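-- pv_equiv track=rewrite | github.com/Leo-678/Scripts | Univer/Substitute-POSCAR.py | reorder_coordinates
-- ===== SOURCE A (Python) =====
-- from typing import List, Tuple
--
-- def reorder_coordinates(
--     lines: List[str],
--     coord_start: int,
--     atom_species_old: List[str],
--     atom_species_new: List[str],
--     final_species: List[str],
-- ) -> List[str]:
--     """
--     Rebuild coordinate lines so that atoms are grouped according to final_species
--     order, while preserving each atom's coordinates and (if present) SD flags.
--     """
--     n_atoms = len(atom_species_old)
--     coord_lines = lines[coord_start : coord_start + n_atoms]
--
--     if len(coord_lines) != n_atoms: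
--         raise ValueError("Number of coordinate lines does not match total atom count.")
--
--     # 为每个原子建立 (element, coord_line)
--     atoms = list(zip(atom_species_new, coord_lines))
--
--     # 按最终元素顺序重排
--     new_coord_lines: List[str] = []
--     for elem in final_species:
--         for e, coord in atoms:
--             if e == elem:
--                 new_coord_lines.append(coord)
--
--     if len(new_coord_lines) != n_atoms:
--         raise RuntimeError("Reordered coordinates length mismatch.")
--
--     # 将新的坐标行写回
--     new_lines = lines[:]
--     new_lines[coord_start : coord_start + n_atoms] = new_coord_lines
--     return new_lines
-- ===== SOURCE B (Python) =====
-- from typing import List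
--
-- def reorder_coordinates(
--     lines: List[str],
--     coord_start: int,
--     atom_species_old: List[str],
--     atom_species_new: List[str],
--     final_species: List[str],
-- ) -> List[str]:
--     n_atoms = len(atom_species_old)
--     coord_lines = lines[coord_start : coord_start + n_atoms]
--     if len(coord_lines) != n_atoms:
--         raise ValueError("Number of coordinate lines does not match total atom count.")
--
--     atoms = list(zip(atom_species_new, coord_lines))
--
--     # stable rearrangement by sorting: each atom's key is the position of its
--     # element in final_species (absent elements sink to the end), ties broken
--     # by the original atom index.
--     rank = {e: i for i, e in enumerate(final_species)}
--     missing = len(final_species)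
--     order = sorted(range(len(atoms)), key=lambda i: (rank.get(atoms[i][0], missing), i))
--     new_coord_lines = [atoms[i][1] for i in order]
--
--     if len(new_coord_lines) != n_atoms:
--         raise RuntimeError("Reordered coordinates length mismatch.")
--
--     new_lines = lines[:]
--     new_lines[coord_start : coord_start + n_atoms] = new_coord_lines
--     return new_lines
-- ===== Notes on version B (the rewrite author's own statement) =====
-- stated objective: alternative
-- what changed: B replaces A's rescan of the whole atom list for every element of final_species by a single stable sort of the atom indices keyed by each element's rank in final_species (ties broken by original index), then reads the coordinates off in sorted order.
-- outside the precondition, e.g. on reorder_coordinates(['a', 'b'], 0, ['x', 'y'], ['H', 'C'], ['H', 'H']): A returns ['a', 'a'], B returns ['a', 'b']; on reorder_coordinates(['a', 'b'], 0, ['x', 'y'], ['H'], ['H', 'H']): A returns ['a', 'a'], B raises RuntimeError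
import Mathlib
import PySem

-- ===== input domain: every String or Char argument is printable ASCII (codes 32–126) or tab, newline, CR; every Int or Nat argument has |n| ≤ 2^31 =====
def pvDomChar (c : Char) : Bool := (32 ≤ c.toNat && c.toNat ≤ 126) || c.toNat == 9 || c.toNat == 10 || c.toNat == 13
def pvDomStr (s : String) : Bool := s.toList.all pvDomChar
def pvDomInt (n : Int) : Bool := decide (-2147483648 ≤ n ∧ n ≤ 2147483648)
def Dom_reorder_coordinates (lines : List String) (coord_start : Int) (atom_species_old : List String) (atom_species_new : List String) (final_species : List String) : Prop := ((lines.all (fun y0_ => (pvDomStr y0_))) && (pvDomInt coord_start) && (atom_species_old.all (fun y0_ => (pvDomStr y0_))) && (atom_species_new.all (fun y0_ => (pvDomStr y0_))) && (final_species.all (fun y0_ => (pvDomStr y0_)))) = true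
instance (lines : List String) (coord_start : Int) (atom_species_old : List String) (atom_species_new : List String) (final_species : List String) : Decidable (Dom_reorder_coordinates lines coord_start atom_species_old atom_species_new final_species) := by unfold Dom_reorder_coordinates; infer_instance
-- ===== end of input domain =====

-- B regroups the coordinate lines by a single stable sort of the enumerated atoms, keyed by each
-- element's rank in final_species (ties broken by the original index), instead of A's rescan of
-- the whole atom list for every element of final_species (objective: alternative algorithm).

-- Python slice assignment xs[a:b] = v (step 1): xs[:a'] + v + xs[max(a',b'):] with Python's clamping.
-- Exact for step-1 slice assignment; used identically by both Pythons' final splice.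
def pySetSlice (xs : List String) (a b : Int) (v : List String) : List String :=
  let a' := PySem.List.clampIdx xs.length a
  let b' := max a' (PySem.List.clampIdx xs.length b)
  xs.take a' ++ v ++ xs.drop b'

-- ===== PORT A =====
def reorder_coordinates (lines : List String) (coord_start : Int) (atom_species_old : List String) (atom_species_new : List String) (final_species : List String) : List String :=
  let nAtoms : Int := atom_species_old.length
  let coordLines := PySem.List.slice lines (some coord_start) (some (coord_start + nAtoms))
  let atoms := atom_species_new.zip coordLines
  let newCoordLines := final_species.foldl (fun acc elem =>
    atoms.foldl (fun acc2 p => if p.1 == elem then acc2 ++ [p.2] else acc2) acc) []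
  pySetSlice lines coord_start (coord_start + nAtoms) newCoordLines

-- ===== PORT B =====
def reorder_coordinates_alt (lines : List String) (coord_start : Int) (atom_species_old : List String) (atom_species_new : List String) (final_species : List String) : List String :=
  let nAtoms : Int := atom_species_old.length
  let coordLines := PySem.List.slice lines (some coord_start) (some (coord_start + nAtoms))
  let atoms := atom_species_new.zip coordLines
  -- rank = {e: i for i, e in enumerate(final_species)}
  let rank := (PySem.List.enumerate final_species).foldl
    (fun (d : PySem.Dict String Int) p => d.insert p.2 p.1) PySem.Dict.empty
  let missing : Int := final_species.length
  -- sorted(enumerate(atoms), key=lambda t: (rank.get(t[1][0], missing), t[0]))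
  let inOrder := PySem.List.sorted2 (PySem.List.enumerate atoms)
    (fun t => rank.getD t.2.1 missing) (fun t => t.1) false
  let newCoordLines := inOrder.map (fun t => t.2.2)
  pySetSlice lines coord_start (coord_start + nAtoms) newCoordLines

-- ===== PRECONDITION & SPEC =====
-- Pre_ excludes (a) the inputs where Python A raises (ValueError: short coordinate slice;
-- RuntimeError: the regrouped lines do not number n_atoms), and (b) the duplicate-key corner
-- where final_species repeats an element that occurs among the zipped atoms: a duplicate-key
-- corner where A's per-occurrence repetition of the matching coordinate block and B's
-- once-per-atom ordering (or B's own length check raising) are equally defensible choices.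
def Pre_reorder_coordinates (lines : List String) (coord_start : Int) (atom_species_old : List String) (atom_species_new : List String) (final_species : List String) : Prop :=
  let n := atom_species_old.length
  let cl := PySem.List.slice lines (some coord_start) (some (coord_start + (n : Int)))
  let atoms := atom_species_new.zip cl
  cl.length = n ∧ atoms.length = n ∧ ∀ e ∈ atoms.map Prod.fst, final_species.count e = 1
instance (lines : List String) (coord_start : Int) (atom_species_old : List String) (atom_species_new : List String) (final_species : List String) : Decidable (Pre_reorder_coordinates lines coord_start atom_species_old atom_species_new final_species) := by unfold Pre_reorder_coordinates; infer_instance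

def pvWitness_reorder_coordinates : List String × Int × List String × List String × List String :=
  (["1.0 0 0", "0 1.0 0"], 0, ["a", "b"], ["O", "H"], ["H", "O"])

def Spec_reorder_coordinates (lines : List String) (coord_start : Int) (atom_species_old : List String) (atom_species_new : List String) (final_species : List String) (out : List String) : Prop := out = reorder_coordinates_alt lines coord_start atom_species_old atom_species_new final_species
instance (lines : List String) (coord_start : Int) (atom_species_old : List String) (atom_species_new : List String) (final_species : List String) (out : List String) : Decidable (Spec_reorder_coordinates lines coord_start atom_species_old atom_species_new final_species out) := by unfold Spec_reorder_coordinates; infer_instance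

-- ===== CLAIM (what is proved, stated in full; the proofs are below) =====
def Claim_equal_reorder_coordinates : Prop := ∀ (lines : List String) (coord_start : Int) (atom_species_old : List String) (atom_species_new : List String) (final_species : List String), Dom_reorder_coordinates lines coord_start atom_species_old atom_species_new final_species → Pre_reorder_coordinates lines coord_start atom_species_old atom_species_new final_species → Spec_reorder_coordinates lines coord_start atom_species_old atom_species_new final_species (reorder_coordinates lines coord_start atom_species_old atom_species_new final_species)

-- ===== LEMMAS AND PROOFS =====

-- Strict lexicographic order on the pair of Int keys that B's tuple-key sort uses.
def LexLT {α : Type} (k1 k2 : α → Int) (a b : α) : Prop :=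
  k1 a < k1 b ∨ (k1 a = k1 b ∧ k2 a < k2 b)

-- The Boolean comparison sorted2 uses agrees with LexLT.
theorem lex_bool_iff {α : Type} (k1 k2 : α → Int) (a b : α) :
    (decide (k1 a < k1 b) || (!decide (k1 b < k1 a) && decide (k2 a < k2 b))) = true ↔ LexLT k1 k2 a b := by
  unfold LexLT
  simp only [Bool.or_eq_true, Bool.and_eq_true, Bool.not_eq_eq_eq_not, Bool.not_true,
    decide_eq_true_eq, decide_eq_false_iff_not]
  omega

-- Insertion into a no-inversion list keeps it inversion-free (lt transitive and irreflexive).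
theorem insertBy_pairwise {α : Type} (lt : α → α → Bool)
    (htrans : ∀ a b c, lt a b = true → lt b c = true → lt a c = true)
    (hirr : ∀ a, lt a a = false) (x : α) (acc : List α)
    (hacc : acc.Pairwise (fun a b => lt b a = false)) :
    (PySem.List.insertBy lt x acc).Pairwise (fun a b => lt b a = false) := by
  induction acc with
  | nil => simp [PySem.List.insertBy]
  | cons y ys ih =>
    rcases List.pairwise_cons.mp hacc with ⟨hy, hys⟩
    by_cases h : lt x y = true
    · rw [PySem.List.insertBy, if_pos h]
      refine List.pairwise_cons.mpr ⟨?_, hacc⟩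
      intro z hz
      rcases List.mem_cons.mp hz with rfl | hz
      · by_contra hc
        have hzx : lt z x = true := by simpa using hc
        have := htrans _ _ _ hzx h
        simp [hirr] at this
      · by_contra hc
        have hzx : lt z x = true := by simpa using hc
        have h2 := htrans _ _ _ hzx h
        rw [hy z hz] at h2; exact Bool.false_ne_true h2
    · rw [PySem.List.insertBy, if_neg h]
      refine List.pairwise_cons.mpr ⟨?_, ih hys⟩
      intro z hz
      rcases (PySem.List.mem_insertBy lt x z ys).mp hz with rfl | hz
      · simpa using h
      · exact hy z hz
  
theorem foldl_insertBy_pairwise {α : Type} (lt : α → α → Bool)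
    (htrans : ∀ a b c, lt a b = true → lt b c = true → lt a c = true)
    (hirr : ∀ a, lt a a = false) (xs acc : List α)
    (hacc : acc.Pairwise (fun a b => lt b a = false)) :
    (xs.foldl (fun acc x => PySem.List.insertBy lt x acc) acc).Pairwise (fun a b => lt b a = false) := by
  induction xs generalizing acc with
  | nil => simpa
  | cons x xs ih => exact ih _ (insertBy_pairwise lt htrans hirr x acc hacc)

-- Uniqueness: any strictly lex-increasing rearrangement of xs IS sorted2 xs k1 k2.
theorem sorted2_eq_of_perm_of_pairwise_lex {α : Type} (xs ys : List α) (k1 k2 : α → Int)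
    (hperm : ys.Perm xs) (hpw : ys.Pairwise (LexLT k1 k2)) :
    PySem.List.sorted2 xs k1 k2 false = ys := by
  set lt : α → α → Bool := fun a b => decide (k1 a < k1 b) || (!decide (k1 b < k1 a) && decide (k2 a < k2 b)) with hlt
  have hiff : ∀ a b, lt a b = true ↔ LexLT k1 k2 a b := fun a b => lex_bool_iff k1 k2 a b
  have htrans : ∀ a b c, lt a b = true → lt b c = true → lt a c = true := by
    intro a b c h1 h2
    rw [hiff] at h1 h2 ⊢; unfold LexLT at *; omega
  have hirr : ∀ a, lt a a = false := by
    intro a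
    by_contra hc
    have := (hiff a a).mp (by revert hc; cases h : lt a a <;> simp)
    unfold LexLT at this; omega
  have hres : PySem.List.sorted2 xs k1 k2 false
      = xs.foldl (fun acc x => PySem.List.insertBy lt x acc) [] := rfl
  have hperm_res : (PySem.List.sorted2 xs k1 k2 false).Perm xs := PySem.List.sorted2_perm xs k1 k2 false
  have hpw_res : (PySem.List.sorted2 xs k1 k2 false).Pairwise (fun a b => lt b a = false) := by
    rw [hres]; exact foldl_insertBy_pairwise lt htrans hirr xs [] (by simp)
  -- key pairs are pairwise distinct on ys, hence on the sort result
  have hne_ys : ys.Pairwise (fun a b => ¬ (k1 a = k1 b ∧ k2 a = k2 b)) := by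
    refine hpw.imp ?_
    intro a b h; unfold LexLT at h; omega
  have hsymm : ∀ {x y : α}, (¬ (k1 x = k1 y ∧ k2 x = k2 y)) → ¬ (k1 y = k1 x ∧ k2 y = k2 x) := by
    intro x y h hc; exact h ⟨hc.1.symm, hc.2.symm⟩
  have hne_res : (PySem.List.sorted2 xs k1 k2 false).Pairwise (fun a b => ¬ (k1 a = k1 b ∧ k2 a = k2 b)) := by
    exact ((hperm.trans hperm_res.symm).pairwise_iff hsymm).mp hne_ys
  have hpw_res' : (PySem.List.sorted2 xs k1 k2 false).Pairwise (LexLT k1 k2) := by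
    refine (hpw_res.and hne_res).imp ?_
    intro a b ⟨hf, hne⟩
    have : ¬ LexLT k1 k2 b a := fun h => by rw [← hiff] at h; rw [hf] at h; exact Bool.false_ne_true h
    unfold LexLT at *; omega
  exact List.Perm.eq_of_pairwise
    (fun a b _ _ h1 h2 => by unfold LexLT at h1 h2; omega)
    hpw_res' hpw (hperm_res.trans hperm.symm)

-- A's nested loops ARE the flatMap of per-element filters.
theorem alist_eq_flatMap (atoms : List (String × String)) (final : List String) :
    final.foldl (fun acc elem =>
        atoms.foldl (fun acc2 p => if p.1 == elem then acc2 ++ [p.2] else acc2) acc) []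
      = final.flatMap (fun e => (atoms.filter (fun p => p.1 == e)).map Prod.snd) := by
  have h : ∀ (acc : List String) (elem : String),
      atoms.foldl (fun acc2 p => if p.1 == elem then acc2 ++ [p.2] else acc2) acc
        = acc ++ (atoms.filter (fun p => p.1 == elem)).map Prod.snd := by
    intro acc elem
    exact PySem.List.foldl_append_if (fun p => p.1 == elem) Prod.snd atoms acc
  calc final.foldl (fun acc elem =>
        atoms.foldl (fun acc2 p => if p.1 == elem then acc2 ++ [p.2] else acc2) acc) []
      = final.foldl (fun acc elem => acc ++ (atoms.filter (fun p => p.1 == elem)).map Prod.snd) [] := by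
        have hfun : (fun (acc : List String) elem =>
            atoms.foldl (fun acc2 p => if p.1 == elem then acc2 ++ [p.2] else acc2) acc)
            = fun acc elem => acc ++ (atoms.filter (fun p => p.1 == elem)).map Prod.snd := by
          funext acc elem; exact h acc elem
        rw [hfun]
    _ = final.flatMap (fun e => (atoms.filter (fun p => p.1 == e)).map Prod.snd) := by
        simpa using PySem.List.foldl_append_eq_flatMap
          (fun e => (atoms.filter (fun p => p.1 == e)).map Prod.snd) final []

-- membership in enumerate
theorem mem_enumerate_iff {α : Type} (xs : List α) (s : Int) (p : Int × α) :
    p ∈ PySem.List.enumerate xs s ↔ ∃ k : Nat, ∃ _ : k < xs.length, p.1 = s + k ∧ p.2 = xs[k] := by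
  induction xs generalizing s with
  | nil => simp [PySem.List.enumerate_nil]
  | cons x t ih =>
    rw [PySem.List.enumerate_cons, List.mem_cons, ih]
    constructor
    · rintro (rfl | ⟨k, hk, h1, h2⟩)
      · exact ⟨0, by simp, by simp, by simp⟩
      · refine ⟨k + 1, by simp only [List.length_cons]; omega, ?_, by simpa using h2⟩
        push_cast
        omega
    · rintro ⟨k, hk, h1, h2⟩
      cases k with
      | zero => left; simp only [List.getElem_cons_zero] at h2; simp only [Nat.cast_zero, add_zero] at h1; cases p; simp_all
      | succ k =>
        right
        refine ⟨k, by simpa [List.length_cons] using hk, ?_, by simpa using h2⟩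
        push_cast at h1 ⊢
        omega

-- first components of enumerate are at least the start
theorem enumerate_fst_ge {α : Type} (xs : List α) (s : Int) :
    ∀ t ∈ PySem.List.enumerate xs s, s ≤ t.1 := by
  intro t ht
  rcases (mem_enumerate_iff xs s t).mp ht with ⟨k, _, h1, _⟩
  omega

-- first components of enumerate are strictly increasing
theorem enumerate_pairwise {α : Type} (xs : List α) (s : Int) :
    (PySem.List.enumerate xs s).Pairwise (fun a b => a.1 < b.1) := by
  induction xs generalizing s with
  | nil => simp [PySem.List.enumerate_nil]
  | cons x t ih =>
    rw [PySem.List.enumerate_cons]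
    refine List.pairwise_cons.mpr ⟨?_, ih (s + 1)⟩
    intro b hb
    have := enumerate_fst_ge t (s + 1) b hb
    omega

-- the rank dict built by the fold answers with the LAST inserted value for a key
theorem foldl_insert_getD (ps : List (Int × String)) (d : PySem.Dict String Int) (e : String) (v : Int) :
    (ps.foldl (fun d p => d.insert p.2 p.1) d).getD e v =
      match ps.reverse.find? (fun p => p.2 == e) with
      | some p => p.1
      | none => d.getD e v := by
  induction ps generalizing d with
  | nil => simp
  | cons p tl ih =>
    rw [List.foldl_cons, ih, List.reverse_cons, List.find?_append]
    cases h : tl.reverse.find? (fun p => p.2 == e) with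
    | some q => simp
    | none =>
      simp only [Option.none_or]
      by_cases he : p.2 = e
      · simp [List.find?, he]
      · simp [List.find?, (by simpa using he : ¬ (p.2 == e) = true), PySem.Dict.getD_insert, Ne.symm he]

-- a value occurring once occurs at a single position
theorem count_one_pos_unique {l : List String} {e : String} (hc : l.count e = 1) :
    ∀ i j : Nat, ∀ _ : i < l.length, ∀ _ : j < l.length, l[i] = e → l[j] = e → i = j := by
  induction l with
  | nil => intro i j hi _ _ _; simp at hi
  | cons a t ih =>
    intro i j hi hj hie hje
    by_cases ha : a = e
    · subst ha
      have hz : t.count a = 0 := by simpa [List.count_cons_self] using hc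
      have hnm : a ∉ t := List.count_eq_zero.mp hz
      match i, j with
      | 0, 0 => rfl
      | 0, j+1 =>
        exfalso; apply hnm
        have hj' : j < t.length := by simpa using hj
        have ht : t[j] = a := by simpa using hje
        exact ht ▸ List.getElem_mem hj'
      | i+1, 0 =>
        exfalso; apply hnm
        have hi' : i < t.length := by simpa using hi
        have ht : t[i] = a := by simpa using hie
        exact ht ▸ List.getElem_mem hi'
      | i+1, j+1 =>
        exfalso; apply hnm
        have hi' : i < t.length := by simpa using hi
        have ht : t[i] = a := by simpa using hie
        exact ht ▸ List.getElem_mem hi'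
    · have hc' : t.count e = 1 := by simpa [List.count_cons, ha] using hc
      match i, j with
      | 0, 0 => rfl
      | 0, _+1 => exact absurd hie ha
      | _+1, 0 => exact absurd hje ha
      | i+1, j+1 =>
        have := ih hc' i j (by simpa using hi) (by simpa using hj) (by simpa using hie) (by simpa using hje)
        omega

-- the rank of a uniquely occurring element is its index in final_species
theorem rank_getD_eq (final : List String) (e : String) (i : Nat) (hi : i < final.length)
    (hc : final.count e = 1) (he : final[i] = e) (v : Int) :
    ((PySem.List.enumerate final).foldl
        (fun (d : PySem.Dict String Int) p => d.insert p.2 p.1) PySem.Dict.empty).getD e v = (i : Int) := by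
  rw [foldl_insert_getD]
  cases h : (PySem.List.enumerate final).reverse.find? (fun p => p.2 == e) with
  | none =>
    exfalso
    have hmem : ((i : Int), e) ∈ (PySem.List.enumerate final (0 : Int)).reverse := by
      rw [List.mem_reverse, mem_enumerate_iff]
      exact ⟨i, hi, by omega, he.symm⟩
    have := List.find?_eq_none.mp h _ hmem
    simp at this
  | some q =>
    have hq2 : q.2 = e := by simpa using List.find?_some h
    have hqmem : q ∈ PySem.List.enumerate final (0 : Int) := by
      have := List.mem_of_find?_eq_some h; simpa using this
    rcases (mem_enumerate_iff final 0 q).mp hqmem with ⟨k, hk, h1, h2⟩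
    have : k = i := count_one_pos_unique hc k i hk hi (by rw [← h2, hq2]) he
    simp only []
    omega

-- filtering the enumerated atoms then projecting = filtering the atoms then projecting
theorem enumerate_filter_map (atoms : List (String × String)) (e : String) (s : Int) :
    (((PySem.List.enumerate atoms s).filter (fun t => t.2.1 == e)).map (fun t => t.2.2))
      = (atoms.filter (fun p => p.1 == e)).map Prod.snd := by
  induction atoms generalizing s with
  | nil => simp [PySem.List.enumerate_nil]
  | cons a t ih =>
    rw [PySem.List.enumerate_cons]
    by_cases h : a.1 = e
    · simp [h, ih]
    · simp [h, ih]

-- sum of an indicator over a list counts occurrences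
theorem sum_map_ite_count (final : List String) (x : String) (c : Nat) :
    (final.map (fun e => if x == e then c else 0)).sum = final.count x * c := by
  induction final with
  | nil => simp
  | cons a t ih =>
    simp only [List.map_cons, List.sum_cons, List.count_cons, ih]
    by_cases h : x = a
    · simp only [h, beq_self_eq_true, if_true, Nat.add_mul]
      omega
    · have hb : (x == a) = false := by simpa using h
      simp [hb, Ne.symm h]

-- The regrouped index-list is a permutation of the enumerated atoms (each element counted once).
theorem perm_flatMap_filter (indexed : List (Int × String × String)) (final : List String)
    (h1 : ∀ t ∈ indexed, final.count t.2.1 = 1) :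
    (final.flatMap (fun e => indexed.filter (fun t => t.2.1 == e))).Perm indexed := by
  rw [List.perm_iff_count]
  intro a
  rw [List.count_flatMap]
  have hterm : ∀ e ∈ final, (List.count a ∘ fun e => indexed.filter (fun t => t.2.1 == e)) e
      = if a.2.1 == e then indexed.count a else 0 := by
    intro e _
    by_cases h : a.2.1 = e
    · simp only [Function.comp_apply, h, beq_self_eq_true, if_true]
      exact List.count_filter (p := fun t => t.2.1 == e) (a := a) (l := indexed) (by simp [h])
    · simp only [Function.comp_apply]
      rw [if_neg (by simpa using h)]
      refine List.count_eq_zero.mpr ?_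
      intro hmem
      exact h (by simpa using (List.of_mem_filter hmem))
  rw [List.map_congr_left hterm, sum_map_ite_count]
  by_cases hmem : a ∈ indexed
  · rw [h1 a hmem, Nat.one_mul]
  · simp [List.count_eq_zero.mpr hmem]

-- ===== the main equality of the two regrouped coordinate line lists =====
theorem coord_lists_eq (atoms : List (String × String)) (final : List String)
    (hcnt : ∀ e ∈ atoms.map Prod.fst, final.count e = 1) :
    (PySem.List.sorted2 (PySem.List.enumerate atoms)
        (fun t => ((PySem.List.enumerate final).foldl
            (fun (d : PySem.Dict String Int) p => d.insert p.2 p.1) PySem.Dict.empty).getD t.2.1 (final.length : Int))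
        (fun t => t.1) false).map (fun t => t.2.2)
      = final.foldl (fun acc elem =>
          atoms.foldl (fun acc2 p => if p.1 == elem then acc2 ++ [p.2] else acc2) acc) [] := by
  set rank := (PySem.List.enumerate final).foldl
      (fun (d : PySem.Dict String Int) p => d.insert p.2 p.1) PySem.Dict.empty with hrank
  set k1 : Int × String × String → Int := fun t => rank.getD t.2.1 (final.length : Int) with hk1
  set k2 : Int × String × String → Int := fun t => t.1 with hk2
  set indexed := PySem.List.enumerate atoms with hindexed
  set ys := final.flatMap (fun e => indexed.filter (fun t => t.2.1 == e)) with hys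
  have hmem_fst : ∀ t ∈ indexed, t.2.1 ∈ atoms.map Prod.fst := by
    intro t ht
    rcases (mem_enumerate_iff atoms 0 t).mp ht with ⟨k, hk, _, h2⟩
    exact h2 ▸ List.mem_map_of_mem (List.getElem_mem hk)
  have hperm : ys.Perm indexed :=
    perm_flatMap_filter indexed final (fun t ht => hcnt _ (hmem_fst t ht))
  -- pairwise lex on ys
  have hpw : ys.Pairwise (LexLT k1 k2) := by
    rw [hys, List.pairwise_flatMap]
    constructor
    · -- within one element's group: equal first key, strictly increasing index
      intro e _
      have hfil : (indexed.filter (fun t => t.2.1 == e)).Pairwise (fun a b => a.1 < b.1) :=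
        (enumerate_pairwise atoms 0).filter _
      refine hfil.imp_of_mem ?_
      intro a b ha hb hab
      have hae : a.2.1 = e := by simpa using (List.of_mem_filter ha)
      have hbe : b.2.1 = e := by simpa using (List.of_mem_filter hb)
      exact Or.inr ⟨by rw [hk1]; simp only [hae, hbe], hab⟩
    · -- across groups: ranks strictly increase along final
      rw [List.pairwise_iff_getElem]
      intro i j hi hj hij a ha b hb
      have hae : a.2.1 = final[i] := by simpa using (List.of_mem_filter ha)
      have hbe : b.2.1 = final[j] := by simpa using (List.of_mem_filter hb)
      have hca : final.count final[i] = 1 := hae ▸ hcnt _ (hmem_fst a (List.mem_of_mem_filter ha))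
      have hcb : final.count final[j] = 1 := hbe ▸ hcnt _ (hmem_fst b (List.mem_of_mem_filter hb))
      have hra : rank.getD a.2.1 (final.length : Int) = (i : Int) := by
        rw [hae]; exact rank_getD_eq final final[i] i hi hca rfl _
      have hrb : rank.getD b.2.1 (final.length : Int) = (j : Int) := by
        rw [hbe]; exact rank_getD_eq final final[j] j hj hcb rfl _
      exact Or.inl (by rw [hk1]; simp only [hra, hrb]; omega)
  have hsorted : PySem.List.sorted2 indexed k1 k2 false = ys :=
    sorted2_eq_of_perm_of_pairwise_lex indexed ys k1 k2 hperm hpw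
  rw [hsorted, hys, List.map_flatMap, alist_eq_flatMap]
  refine List.flatMap_congr ?_
  intro e _
  exact enumerate_filter_map atoms e 0

-- ===== VERDICT (by name: the statement is the Claim_ definition above) =====
theorem reorder_coordinates_spec : Claim_equal_reorder_coordinates := by
  intro lines coord_start old new final _ hpre
  obtain ⟨_, _, hcnt⟩ := hpre
  simp only [Spec_reorder_coordinates, reorder_coordinates, reorder_coordinates_alt]
  rw [coord_lists_eq (new.zip (PySem.List.slice lines (some coord_start) (some (coord_start + (old.length : Int))))) final hcnt]
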